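-- pv_equiv track=rewrite | github.com/emw314159/badass_tools_from_emily | bioinformatics/seq_utils.py | find_homopolymer_segments
-- ===== SOURCE A (Python) =====
-- def find_homopolymer_segments(seq, skip=[]):
--     last_base = ''
--     chain = []
--     current_chain = ''
--     for base in seq:
--
--         if base in skip:
--             continue
--
--         if base == last_base:
--             current_chain += base
--         else:
--             if current_chain != '':
--                 chain.append(current_chain)
--             current_chain = base
--         last_base = base
--     chain.append(current_chain)
--
--     segment_lengths = [len(x) for x in chain]
--     max_segment_length = max(segment_lengths)
--
--     return chain, segment_lengths, max_segment_length
-- ===== SOURCE B (Python) =====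
-- def find_homopolymer_segments(seq, skip=[]):
--     kept = [b for b in seq if b not in skip]
--     n = len(kept)
--     if n == 0:
--         return [''], [0], 0
--     cuts = [i for i in range(n) if i == 0 or kept[i] != kept[i - 1]] + [n]
--     segment_lengths = [b - a for a, b in zip(cuts, cuts[1:])]
--     chain = [kept[a] * l for a, l in zip(cuts, segment_lengths)]
--     return chain, segment_lengths, max(segment_lengths)
-- ===== Notes on version B (the rewrite author's own statement) =====
-- stated objective: alternative
-- what changed: Instead of A's stateful accumulation of the current run, B computes the list of run-start indices (boundary positions where the base changes) over the filtered sequence, derives the segment lengths arithmetically as differences of consecutive boundaries, and materialises each segment by character repetition kept[a]*l; no run string is ever grown incrementally.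
import Mathlib
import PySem

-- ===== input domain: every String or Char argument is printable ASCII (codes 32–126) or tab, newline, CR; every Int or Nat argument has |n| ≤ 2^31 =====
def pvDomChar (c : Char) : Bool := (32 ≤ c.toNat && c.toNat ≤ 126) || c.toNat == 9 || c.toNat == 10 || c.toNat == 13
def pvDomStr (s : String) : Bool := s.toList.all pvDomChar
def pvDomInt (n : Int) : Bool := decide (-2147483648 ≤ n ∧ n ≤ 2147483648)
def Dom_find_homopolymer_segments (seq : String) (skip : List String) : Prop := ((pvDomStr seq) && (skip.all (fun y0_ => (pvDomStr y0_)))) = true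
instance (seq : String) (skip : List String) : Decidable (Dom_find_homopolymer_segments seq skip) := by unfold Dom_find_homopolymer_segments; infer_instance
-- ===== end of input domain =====

-- B replaces A's stateful run accumulation by index arithmetic: it computes the run-start
-- boundary positions of the filtered sequence, reads the segment lengths off as differences of
-- consecutive boundaries, and builds each segment by character repetition; not faster, alternative.

-- ===== PORT A =====
-- the loop body of A: state = (last_base, chain, current_chain)
def pvStepA (skip : List String) (st : List Char × List (List Char) × List Char) (base : Char) :
    List Char × List (List Char) × List Char :=
  if skip.contains (String.ofList [base]) then st
  else if [base] = st.1 then (st.1, st.2.1, st.2.2 ++ [base])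
  else ([base], if st.2.2 ≠ [] then st.2.1 ++ [st.2.2] else st.2.1, [base])

def find_homopolymer_segments (seq : String) (skip : List String) : List String × List Int × Int :=
  let r := seq.toList.foldl (pvStepA skip) ([], [], [])
  let chain := (r.2.1 ++ [r.2.2]).map String.ofList
  let segment_lengths := chain.map (fun x => PySem.Str.len x)
  (chain, segment_lengths, (PySem.List.max? segment_lengths (fun y => y)).getD 0)

-- ===== PORT B =====
-- B's boundary predicate: `i == 0 or kept[i] != kept[i-1]`
def pvIsCut (kept : List Char) (i : Nat) : Bool := i == 0 || !(kept.getD i ' ' == kept.getD (i - 1) ' ')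

-- B's boundary list: `[i for i in range(n) if i == 0 or kept[i] != kept[i-1]] + [n]`
def pvCuts (kept : List Char) : List Nat := (List.range kept.length).filter (pvIsCut kept) ++ [kept.length]

-- B's differences of consecutive entries: `[b - a for a, b in zip(cuts, cuts[1:])]`
def pvDiffs (xs : List Nat) : List Int := (xs.zip xs.tail).map (fun p => (p.2 : Int) - (p.1 : Int))

def find_homopolymer_segments_alt (seq : String) (skip : List String) : List String × List Int × Int :=
  let kept := seq.toList.filter (fun b => !(skip.contains (String.ofList [b])))
  if kept.length == 0 then ([""], [(0 : Int)], 0)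
  else
    let cuts := pvCuts kept
    let segment_lengths := pvDiffs cuts
    let chain := (cuts.zip segment_lengths).map
      (fun p => String.ofList (List.replicate p.2.toNat (kept.getD p.1 ' ')))
    (chain, segment_lengths, (PySem.List.max? segment_lengths (fun y => y)).getD 0)

-- ===== PRECONDITION & SPEC =====
def Spec_find_homopolymer_segments (seq : String) (skip : List String) (out : List String × List Int × Int) : Prop := out = find_homopolymer_segments_alt seq skip
instance (seq : String) (skip : List String) (out : List String × List Int × Int) : Decidable (Spec_find_homopolymer_segments seq skip out) := by unfold Spec_find_homopolymer_segments; infer_instance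

-- ===== CLAIM (what is proved, stated in full; the proofs are below) =====
def Claim_equal_find_homopolymer_segments : Prop := ∀ (seq : String) (skip : List String), Dom_find_homopolymer_segments seq skip → Spec_find_homopolymer_segments seq skip (find_homopolymer_segments seq skip)

-- ===== LEMMAS AND PROOFS =====

-- the maximal runs of equal chars: the common yardstick both ports are compared against
def pvGroupRuns : List Char → List (List Char)
  | [] => []
  | c :: cs => (c :: cs.takeWhile (· == c)) :: pvGroupRuns (cs.dropWhile (· == c))
termination_by l => l.length
decreasing_by simpa using Nat.lt_succ_of_le (List.length_dropWhile_le _ _)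

theorem pvGroupRuns_nil : pvGroupRuns [] = [] := by rw [pvGroupRuns.eq_def]

theorem pvGroupRuns_cons (c : Char) (t : List Char) :
    pvGroupRuns (c :: t) =
      (c :: t.takeWhile (· == c)) :: pvGroupRuns (t.dropWhile (· == c)) := by
  rw [pvGroupRuns.eq_def]

-- A's loop over seq equals A's loop (skip branch never taken) over the filtered list
theorem pv_foldA_filter (skip : List String) (l : List Char)
    (st : List Char × List (List Char) × List Char) :
    l.foldl (pvStepA skip) st =
      (l.filter (fun b => !(skip.contains (String.ofList [b])))).foldl (pvStepA skip) st := by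
  induction l generalizing st with
  | nil => rfl
  | cons a t ih =>
    by_cases h : String.ofList [a] ∈ skip
    · simp [List.foldl, pvStepA, h, ih]
    · simp [List.foldl, pvStepA, h, ih]

-- main invariant of A: starting a run of c with nonempty current_chain cur
theorem pv_foldA_runs (skip : List String) (cs : List Char)
    (hcs : ∀ b ∈ cs, String.ofList [b] ∉ skip) :
    ∀ (c : Char) (chain : List (List Char)) (cur : List Char), cur ≠ [] →
      (let r := cs.foldl (pvStepA skip) ([c], chain, cur); r.2.1 ++ [r.2.2]) =
        chain ++ [cur ++ cs.takeWhile (· == c)] ++ pvGroupRuns (cs.dropWhile (· == c)) := by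
  induction cs with
  | nil => intro c chain cur _; simp [pvGroupRuns_nil]
  | cons a t ih =>
    intro c chain cur hcur
    have ha : String.ofList [a] ∉ skip := hcs a (by simp)
    have ht : ∀ b ∈ t, String.ofList [b] ∉ skip := fun b hb => hcs b (by simp [hb])
    by_cases hac : a = c
    · subst hac
      have hstep : pvStepA skip ([a], chain, cur) a = ([a], chain, cur ++ [a]) := by
        simp [pvStepA, ha]
      simp only [List.foldl, hstep]
      rw [ih ht a chain (cur ++ [a]) (by simp)]
      simp
    · have hbe : (a == c) = false := by simp [hac]
      have hstep : pvStepA skip ([c], chain, cur) a = ([a], chain ++ [cur], [a]) := by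
        simp [pvStepA, ha, hac, hcur]
      simp only [List.foldl, hstep]
      rw [ih ht a (chain ++ [cur]) [a] (by simp)]
      rw [List.takeWhile_cons, List.dropWhile_cons, hbe]
      simp only [Bool.false_eq_true, if_false]
      rw [pvGroupRuns_cons]
      simp

-- A's finished chain over the kept list is exactly the list of runs (or [[]] if kept is empty)
theorem pv_chain_eq (skip : List String) (kept : List Char)
    (hk : ∀ b ∈ kept, String.ofList [b] ∉ skip) :
    (let r := kept.foldl (pvStepA skip) ([], [], []); r.2.1 ++ [r.2.2]) =
      if kept = [] then [([] : List Char)] else pvGroupRuns kept := by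
  cases kept with
  | nil => simp
  | cons c t =>
    have hc : String.ofList [c] ∉ skip := hk c (by simp)
    have ht : ∀ b ∈ t, String.ofList [b] ∉ skip := fun b hb => hk b (by simp [hb])
    have hstep : pvStepA skip ([], [], []) c = ([c], [], [c]) := by
      simp [pvStepA, hc]
    simp only [List.foldl, hstep]
    rw [pv_foldA_runs skip t ht c [] [c] (by simp)]
    rw [pvGroupRuns_cons]
    simp

-- the head run is a replicate
theorem pv_run_replicate (c : Char) (t : List Char) :
    c :: t.takeWhile (· == c) = List.replicate ((t.takeWhile (· == c)).length + 1) c := by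
  rw [List.eq_replicate_iff]
  refine ⟨by simp, ?_⟩
  intro x hx
  rcases List.mem_cons.1 hx with h | h
  · exact h
  · simpa using List.mem_takeWhile_imp h

theorem pv_getD_replicate (k i : Nat) (c : Char) (h : i < k) :
    (List.replicate k c).getD i ' ' = c := by
  simp [List.getD, h]

theorem pv_getD_append_right (l1 l2 : List Char) (i : Nat) :
    (l1 ++ l2).getD (l1.length + i) ' ' = l2.getD i ' ' := by
  simp [List.getD, List.getElem?_append_right]

theorem pvDiffs_cons_cons (a b : Nat) (t : List Nat) :
    pvDiffs (a :: b :: t) = ((b : Int) - (a : Int)) :: pvDiffs (b :: t) := rfl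

-- shifting every boundary leaves the differences unchanged
theorem pvDiffs_map_add (k : Nat) (xs : List Nat) :
    pvDiffs (xs.map (k + ·)) = pvDiffs xs := by
  induction xs with
  | nil => rfl
  | cons a t ih =>
    cases t with
    | nil => rfl
    | cons b t' =>
      rw [List.map_cons, List.map_cons, pvDiffs_cons_cons, pvDiffs_cons_cons, ← List.map_cons]
      rw [ih]
      congr 1
      push_cast
      ring

-- structure of B's boundary list on a nonempty kept list
theorem pvCuts_cons (c : Char) (t : List Char) :
    pvCuts (c :: t) =
      0 :: (pvCuts (t.dropWhile (· == c))).map (((t.takeWhile (· == c)).length + 1) + ·) := by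
  set tw := t.takeWhile (· == c) with htw
  set rest := t.dropWhile (· == c) with hrest
  set k := tw.length + 1 with hk
  set m := rest.length with hm
  have hsplit : c :: t = List.replicate k c ++ rest := by
    conv_lhs => rw [← List.takeWhile_append_dropWhile (p := (· == c)) (l := t)]
    rw [← hrest, ← htw, ← List.cons_append, pv_run_replicate, ← htw, ← hk]
  have hlen : (c :: t).length = k + m := by rw [hsplit]; simp [hm]
  have hgetL : ∀ i, i < k → (c :: t).getD i ' ' = c := by
    intro i hi
    rw [hsplit, List.getD_append _ _ _ _ (by simpa using hi), pv_getD_replicate _ _ _ hi]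
  have hgetR : ∀ j, (c :: t).getD (k + j) ' ' = rest.getD j ' ' := by
    intro j
    rw [hsplit]
    have h := pv_getD_append_right (List.replicate k c) rest j
    simpa using h
  unfold pvCuts
  rw [hlen, List.range_add, List.filter_append, List.filter_map]
  have h1 : (List.range k).filter (pvIsCut (c :: t)) = [0] := by
    rw [List.filter_congr (q := fun i => i == 0) ?_]
    · rw [hk]; simp [List.range_succ_eq_map, List.filter_map]
    · intro i hi
      have hik : i < k := List.mem_range.1 hi
      cases i with
      | zero => rfl
      | succ j =>
        have ha : j + 1 < k := hik
        have hb : j < k := by omega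
        show pvIsCut (c :: t) (j + 1) = ((j + 1 : Nat) == 0)
        unfold pvIsCut
        rw [show j + 1 - 1 = j from rfl, hgetL _ ha, hgetL _ hb]
        simp
  have h2 : (List.range m).filter (pvIsCut (c :: t) ∘ (fun x => k + x)) =
      (List.range m).filter (pvIsCut rest) := by
    apply List.filter_congr
    intro j hj
    have hjm : j < m := List.mem_range.1 hj
    simp only [Function.comp_apply]
    cases j with
    | zero =>
      have hmne : rest ≠ [] := by
        intro h0
        rw [hm, h0] at hjm
        simp at hjm
      obtain ⟨b, t'', hb⟩ := List.exists_cons_of_ne_nil hmne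
      have hbc : (b == c) = false := by
        have := List.head_dropWhile_not (l := t) (p := (· == c)) (by simp [← hrest, hb])
        simpa [← hrest, hb] using this
      have ha : (c :: t).getD (k + 0) ' ' = rest.getD 0 ' ' := hgetR 0
      have hc' : (c :: t).getD (k + 0 - 1) ' ' = c := by
        rw [show k + 0 - 1 = k - 1 by omega]; exact hgetL _ (by omega)
      unfold pvIsCut
      rw [ha, hc', hb]
      simp [hk, hbc]
    | succ i =>
      have ha : (c :: t).getD (k + (i + 1)) ' ' = rest.getD (i + 1) ' ' := hgetR (i + 1)
      have hbv : (c :: t).getD (k + (i + 1) - 1) ' ' = rest.getD i ' ' := by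
        rw [show k + (i + 1) - 1 = k + i by omega]; exact hgetR i
      unfold pvIsCut
      rw [ha, hbv, show (i + 1) - 1 = i from rfl]
      simp [hk]
  rw [h1, h2]
  simp [List.map_append, Nat.add_comm, hm]


-- main correspondence: B's cut-based lengths and segments are exactly the runs
theorem pv_main : ∀ (n : Nat) (kept : List Char), kept.length ≤ n → kept ≠ [] →
    pvDiffs (pvCuts kept) = (pvGroupRuns kept).map (fun r => (r.length : Int)) ∧
    ((pvCuts kept).zip (pvDiffs (pvCuts kept))).map
        (fun p => List.replicate p.2.toNat (kept.getD p.1 ' ')) = pvGroupRuns kept := by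
  intro n
  induction n with
  | zero => intro kept hle hne; cases kept with
    | nil => exact absurd rfl hne
    | cons c t => simp at hle
  | succ n ih =>
    intro kept hle hne
    obtain ⟨c, t, rfl⟩ := List.exists_cons_of_ne_nil hne
    set tw := t.takeWhile (· == c) with htw
    set rest := t.dropWhile (· == c) with hrest
    set k := tw.length + 1 with hk
    have hcuts := pvCuts_cons c t
    rw [← htw, ← hrest, ← hk] at hcuts
    have hsplit : c :: t = List.replicate k c ++ rest := by
      conv_lhs => rw [← List.takeWhile_append_dropWhile (p := (· == c)) (l := t)]
      rw [← hrest, ← htw, ← List.cons_append, pv_run_replicate, ← htw, ← hk]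
    have hrun : pvGroupRuns (c :: t) = (c :: tw) :: pvGroupRuns rest := by
      rw [pvGroupRuns_cons, ← htw, ← hrest]
    have hget0 : (c :: t).getD 0 ' ' = c := rfl
    have hgetR : ∀ j, (c :: t).getD (k + j) ' ' = rest.getD j ' ' := by
      intro j
      rw [hsplit]
      have h := pv_getD_append_right (List.replicate k c) rest j
      simpa using h
    cases hr : rest with
    | nil =>
      rw [hr] at hcuts hrun
      rw [show pvCuts ([] : List Char) = [0] from rfl] at hcuts
      simp only [List.map_cons, List.map_nil] at hcuts
      rw [hcuts, hrun, pvGroupRuns_nil]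
      constructor
      · rw [show ((k + 0) : Nat) = k from rfl, pvDiffs_cons_cons]
        simp [pvDiffs, hk]
      · rw [show ((k + 0) : Nat) = k from rfl, pvDiffs_cons_cons]
        simp only [pvDiffs]
        show List.map _ [((0:Nat), ((k+0:Nat):Int) - ((0:Nat):Int))] = [c :: tw]
        simp only [List.map_cons, List.map_nil]
        congr 1
        rw [hget0, pv_run_replicate, ← htw]
        congr 1
    | cons b t'' =>
      have hlen : (c :: t).length = k + rest.length := by rw [hsplit]; simp
      have hrle : rest.length ≤ n := by
        have hk1 : 1 ≤ k := by rw [hk]; omega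
        rw [hlen] at hle
        omega
      obtain ⟨ihL, ihC⟩ := ih rest hrle (by rw [hr]; simp)
      obtain ⟨ys, hys⟩ : ∃ ys, pvCuts rest = 0 :: ys := by
        rw [hr]; exact ⟨_, pvCuts_cons b t''⟩
      have hD : pvDiffs (pvCuts (c :: t)) = (k : Int) :: pvDiffs (pvCuts rest) := by
        rw [hcuts, hys, List.map_cons, pvDiffs_cons_cons, ← List.map_cons, ← hys, pvDiffs_map_add]
        norm_num
      have hrunlen : ((c :: tw).length : Int) = (k : Int) := by simp [hk]
      constructor
      · rw [hD, ihL, hrun, List.map_cons, hrunlen]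
      · rw [hD, hcuts, List.zip_cons_cons, List.map_cons]
        have hhead : List.replicate ((k : Int)).toNat ((c :: t).getD 0 ' ') = c :: tw := by
          rw [hget0, pv_run_replicate, ← htw, ← hk]
          congr 1
        have htail : List.map (fun p => List.replicate p.2.toNat ((c :: t).getD p.1 ' '))
            (((pvCuts rest).map (k + ·)).zip (pvDiffs (pvCuts rest))) = pvGroupRuns rest := by
          rw [List.zip_map_left, List.map_map]
          rw [← ihC]
          apply List.map_congr_left
          intro p _
          simp only [Function.comp_apply, Prod.map_fst, Prod.map_snd, id]
          rw [hgetR]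
        rw [hhead, htail, hrun]

-- ===== VERDICT (by name: the statement is the Claim_ definition above) =====
theorem find_homopolymer_segments_spec : Claim_equal_find_homopolymer_segments := by
  intro seq skip _
  unfold Spec_find_homopolymer_segments find_homopolymer_segments find_homopolymer_segments_alt
  set kept := seq.toList.filter (fun b => !(skip.contains (String.ofList [b]))) with hkept
  have hk : ∀ b ∈ kept, String.ofList [b] ∉ skip := by
    intro b hb
    rw [hkept] at hb
    simpa using (List.of_mem_filter hb)
  have h1 := pv_foldA_filter skip seq.toList ([], [], [])
  rw [← hkept] at h1
  have h2 := pv_chain_eq skip kept hk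
  simp only at h2
  simp only [h1, h2]
  cases hkc : kept with
  | nil => decide
  | cons c t =>
    obtain ⟨hL, hC⟩ := pv_main (c :: t).length (c :: t) le_rfl (by simp)
    have hne : ((c :: t).length == 0) = false := by simp
    rw [if_neg (by simp), hne]
    simp only [Bool.false_eq_true, if_false]
    have hchain : (pvGroupRuns (c :: t)).map String.ofList =
        ((pvCuts (c :: t)).zip (pvDiffs (pvCuts (c :: t)))).map
          (fun p => String.ofList (List.replicate p.2.toNat ((c :: t).getD p.1 ' '))) := by
      rw [← hC, List.map_map]
      rfl
    have hlens : ((pvGroupRuns (c :: t)).map String.ofList).map (fun x => PySem.Str.len x) =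
        pvDiffs (pvCuts (c :: t)) := by
      rw [hL, List.map_map]
      apply List.map_congr_left
      intro r _
      simp [PySem.Str.len_eq, Function.comp]
    rw [hchain] at hlens ⊢
    rw [hlens]
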